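-- pv_equiv track=rewrite | github.com/1251408860-oss/FedSTGCN-CDRO-Repro | mininet_arena_v2.py | build_bot_types
-- ===== SOURCE A (Python) =====
-- def build_bot_types(num_bots: int, mode: str) -> dict[int, str]:
--     if mode == "all_mimic":
--         return {i: "mimic" for i in range(num_bots)}
--     if mode == "all_slowburn":
--         return {i: "slowburn" for i in range(num_bots)}
--     if mode == "all_burst":
--         return {i: "burst" for i in range(num_bots)}
--     if mode == "mimic_heavy":
--         # Harder semantic camouflage while keeping strategy diversity for OOD tests.
--         n_mimic = int(round(0.70 * num_bots))
--         n_slow = int(round(0.20 * num_bots))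
--         n_burst = max(0, num_bots - n_mimic - n_slow)
--         types: dict[int, str] = {}
--         for i in range(n_mimic):
--             types[i] = "mimic"
--         for i in range(n_mimic, n_mimic + n_slow):
--             types[i] = "slowburn"
--         for i in range(n_mimic + n_slow, n_mimic + n_slow + n_burst):
--             types[i] = "burst"
--         for i in range(num_bots):
--             types.setdefault(i, "mimic")
--         return types
--
--     # mixed: slowburn 60%, burst 25%, mimic 15%
--     n_slow = int(round(0.60 * num_bots))
--     n_burst = int(round(0.25 * num_bots))
--     n_mimic = max(0, num_bots - n_slow - n_burst)
--     types: dict[int, str] = {}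
--     for i in range(n_slow):
--         types[i] = "slowburn"
--     for i in range(n_slow, n_slow + n_burst):
--         types[i] = "burst"
--     for i in range(n_slow + n_burst, n_slow + n_burst + n_mimic):
--         types[i] = "mimic"
--     for i in range(num_bots):
--         types.setdefault(i, "slowburn")
--     return types
-- ===== SOURCE B (Python) =====
-- def build_bot_types(num_bots: int, mode: str) -> dict[int, str]:
--     # Table-driven: each mode maps to ordered (label, fraction) blocks;
--     # fraction None = "whatever is left".  Unknown modes fall back to mixed.
--     specs = {
--         "all_mimic": [("mimic", None)],
--         "all_slowburn": [("slowburn", None)],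
--         "all_burst": [("burst", None)],
--         "mimic_heavy": [("mimic", 0.70), ("slowburn", 0.20), ("burst", None)],
--     }
--     spec = specs.get(mode, [("slowburn", 0.60), ("burst", 0.25), ("mimic", None)])
--     flat: list[str] = []
--     for label, frac in spec:
--         if frac is None:
--             count = max(0, num_bots - len(flat))
--         else:
--             count = int(round(frac * num_bots))
--         flat += [label] * count
--     return dict(enumerate(flat))
-- ===== Notes on version B (the rewrite author's own statement) =====
-- stated objective: simpler
-- what changed: A's four per-mode branches with hand-written block-insertion loops plus a setdefault backfill pass are replaced by one table mapping each mode to ordered (label, fraction) blocks; the result is built by concatenating [label]*count lists and enumerating the flat list, with the last block taking max(0, remainder).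
import Mathlib
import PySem

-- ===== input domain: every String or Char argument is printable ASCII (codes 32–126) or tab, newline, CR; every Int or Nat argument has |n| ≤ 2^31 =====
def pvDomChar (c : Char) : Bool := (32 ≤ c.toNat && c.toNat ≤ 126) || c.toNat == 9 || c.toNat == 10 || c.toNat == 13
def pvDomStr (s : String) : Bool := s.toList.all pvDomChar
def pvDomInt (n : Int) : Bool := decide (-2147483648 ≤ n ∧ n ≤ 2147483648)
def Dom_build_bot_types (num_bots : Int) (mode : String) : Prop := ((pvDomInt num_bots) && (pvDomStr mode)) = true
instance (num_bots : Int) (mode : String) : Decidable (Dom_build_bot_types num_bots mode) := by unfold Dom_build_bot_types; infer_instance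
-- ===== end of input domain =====

-- B replaces A's four hand-written per-mode block-insertion loop chains by one table of
-- (label, fraction) blocks concatenated into a flat list and enumerated (objective: simpler).

-- ---- shared primitive: exact model of Python's int(round(c * n)) for an IEEE double c = C / 2^S ----
-- round a / 2^k to the nearest integer, ties to even (this IS IEEE's / round()'s tie rule)
def pyRNE (a k : Nat) : Nat :=
  if k = 0 then a
  else
    let q := a / 2 ^ k
    let r := a % 2 ^ k
    if 2 ^ (k - 1) < r ∨ (r = 2 ^ (k - 1) ∧ q % 2 = 1) then q + 1 else q

def pvBits : Nat → Nat → Nat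
  | 0, _ => 0
  | fuel + 1, n => if n = 0 then 0 else pvBits fuel (n / 2) + 1

def roundMulPos (C S n : Nat) : Nat :=
  let a := C * n
  let k := pvBits 100 a - 53
  pyRNE (pyRNE a k) (S - k)

def roundMul (C S : Nat) (n : Int) : Int :=
  if n < 0 then -(roundMulPos C S (-n).toNat : Int) else (roundMulPos C S n.toNat : Int)

-- ===== PORT A =====
def build_bot_types (num_bots : Int) (mode : String) : List (Int × String) :=
  if mode == "all_mimic" then
    ((PySem.List.pyRange 0 num_bots 1).foldl (fun d i => d.insert i "mimic")
      (PySem.Dict.empty : PySem.Dict Int String)).items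
  else if mode == "all_slowburn" then
    ((PySem.List.pyRange 0 num_bots 1).foldl (fun d i => d.insert i "slowburn")
      (PySem.Dict.empty : PySem.Dict Int String)).items
  else if mode == "all_burst" then
    ((PySem.List.pyRange 0 num_bots 1).foldl (fun d i => d.insert i "burst")
      (PySem.Dict.empty : PySem.Dict Int String)).items
  else if mode == "mimic_heavy" then
    let n_mimic := roundMul 6305039478318694 53 num_bots       -- 0.70 = 6305039478318694/2^53
    let n_slow := roundMul 7205759403792794 55 num_bots        -- 0.20 = 7205759403792794/2^55
    let n_burst := max 0 (num_bots - n_mimic - n_slow)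
    let t1 := (PySem.List.pyRange 0 n_mimic 1).foldl (fun d i => d.insert i "mimic")
      (PySem.Dict.empty : PySem.Dict Int String)
    let t2 := (PySem.List.pyRange n_mimic (n_mimic + n_slow) 1).foldl
      (fun d i => d.insert i "slowburn") t1
    let t3 := (PySem.List.pyRange (n_mimic + n_slow) (n_mimic + n_slow + n_burst) 1).foldl
      (fun d i => d.insert i "burst") t2
    let t4 := (PySem.List.pyRange 0 num_bots 1).foldl (fun d i => d.setdefault i "mimic") t3
    t4.items
  else
    let n_slow := roundMul 5404319552844595 53 num_bots        -- 0.60 = 5404319552844595/2^53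
    let n_burst := roundMul 4503599627370496 54 num_bots       -- 0.25 = 4503599627370496/2^54
    let n_mimic := max 0 (num_bots - n_slow - n_burst)
    let t1 := (PySem.List.pyRange 0 n_slow 1).foldl (fun d i => d.insert i "slowburn")
      (PySem.Dict.empty : PySem.Dict Int String)
    let t2 := (PySem.List.pyRange n_slow (n_slow + n_burst) 1).foldl
      (fun d i => d.insert i "burst") t1
    let t3 := (PySem.List.pyRange (n_slow + n_burst) (n_slow + n_burst + n_mimic) 1).foldl
      (fun d i => d.insert i "mimic") t2
    let t4 := (PySem.List.pyRange 0 num_bots 1).foldl (fun d i => d.setdefault i "slowburn") t3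
    t4.items

-- ===== PORT B =====
-- a float literal 0.70 … is carried as its exact (significand, scale) pair (C, S), value C/2^S
def build_bot_types_alt (num_bots : Int) (mode : String) : List (Int × String) :=
  let specs : PySem.Dict String (List (String × Option (Nat × Nat))) := PySem.Dict.ofList
    [("all_mimic", [("mimic", none)]),
     ("all_slowburn", [("slowburn", none)]),
     ("all_burst", [("burst", none)]),
     ("mimic_heavy", [("mimic", some (6305039478318694, 53)),
                      ("slowburn", some (7205759403792794, 55)), ("burst", none)])]
  let spec := (specs.get? mode).getD
    [("slowburn", some (5404319552844595, 53)), ("burst", some (4503599627370496, 54)), ("mimic", none)]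
  let flat := spec.foldl (fun flat lf =>
    let count : Int :=
      match lf.2 with
      | none => max 0 (num_bots - (flat.length : Int))
      | some cs => roundMul cs.1 cs.2 num_bots
    flat ++ List.replicate count.toNat lf.1) ([] : List String)
  PySem.List.enumerate flat 0

-- ===== PRECONDITION & SPEC =====
def Spec_build_bot_types (num_bots : Int) (mode : String) (out : List (Int × String)) : Prop := out = build_bot_types_alt num_bots mode
instance (num_bots : Int) (mode : String) (out : List (Int × String)) : Decidable (Spec_build_bot_types num_bots mode out) := by unfold Spec_build_bot_types; infer_instance

-- ===== CLAIM (what is proved, stated in full; the proofs are below) =====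
def Claim_equal_build_bot_types : Prop := ∀ (num_bots : Int) (mode : String), Dom_build_bot_types num_bots mode → Spec_build_bot_types num_bots mode (build_bot_types num_bots mode)

-- ===== LEMMAS AND PROOFS =====

theorem pyRNE_zero (k : Nat) : pyRNE 0 k = 0 := by
  unfold pyRNE
  rcases eq_or_ne k 0 with h | h
  · simp [h]
  · have hp : 0 < 2 ^ (k - 1) := by positivity
    simp [h]

theorem roundMulPos_zero (C S : Nat) : roundMulPos C S 0 = 0 := by
  unfold roundMulPos
  simp [pyRNE_zero]

theorem pyRNE_le (a k : Nat) : 2 ^ k * pyRNE a k ≤ a + 2 ^ (k - 1) := by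
  unfold pyRNE
  rcases eq_or_ne k 0 with h | h
  · simp [h]
  · have h2 : 2 ^ k = 2 * 2 ^ (k - 1) := by
      rw [← pow_succ']
      congr 1
      omega
    have hd : 2 ^ k * (a / 2 ^ k) + a % 2 ^ k = a := Nat.div_add_mod a (2 ^ k)
    have hm : a % 2 ^ k < 2 ^ k := Nat.mod_lt _ (by positivity)
    simp only [h, if_false]
    split_ifs with hcond
    · rw [Nat.mul_add, Nat.mul_one]
      omega
    · omega

theorem pvBits_le (fuel n m : Nat) (h : n < 2 ^ m) : pvBits fuel n ≤ m := by
  induction fuel generalizing n m with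
  | zero => simp [pvBits]
  | succ fuel ih =>
    unfold pvBits
    rcases eq_or_ne n 0 with h0 | h0
    · simp [h0]
    · have hm : 1 ≤ m := by
        by_contra hc
        interval_cases m
        omega
      have hh : n / 2 < 2 ^ (m - 1) := by
        have : 2 ^ m = 2 * 2 ^ (m - 1) := by
          rw [← pow_succ']
          congr 1
          omega
        omega
      have := ih (n / 2) (m - 1) hh
      simp [h0]
      omega

theorem le_pvBits (fuel n : Nat) (h : n ≠ 0) : 2 ^ (pvBits fuel n - 1) ≤ n := by
  induction fuel generalizing n with
  | zero => simpa [pvBits] using Nat.one_le_iff_ne_zero.mpr h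
  | succ fuel ih =>
    unfold pvBits
    simp only [h, if_false]
    rcases eq_or_ne (n / 2) 0 with h0 | h0
    · rcases Nat.eq_zero_or_pos (pvBits fuel (n / 2)) with hb | hb
      · simpa [hb] using Nat.one_le_iff_ne_zero.mpr h
      · have := pvBits_le fuel (n / 2) 0 (by omega)
        omega
    · rcases Nat.eq_zero_or_pos (pvBits fuel (n / 2)) with hb | hb
      · simpa [hb] using Nat.one_le_iff_ne_zero.mpr h
      · have := ih (n / 2) h0
        have h2 : 2 ^ (pvBits fuel (n / 2) + 1 - 1) = 2 * 2 ^ (pvBits fuel (n / 2) - 1) := by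
          rw [← pow_succ']
          congr 1
          omega
        omega

theorem roundMulPos_eq (C S n : Nat) :
    roundMulPos C S n
      = pyRNE (pyRNE (C * n) (pvBits 100 (C * n) - 53)) (S - (pvBits 100 (C * n) - 53)) := rfl

theorem roundMulPos_le (C S n : Nat) (hC : C < 2 ^ 53) (hn : n ≤ 2 ^ 31) (hS1 : 53 ≤ S) (hS2 : S ≤ 60) :
    2 ^ (53 + S) * roundMulPos C S n ≤ 2 ^ 53 * (C * n) + C * n + 2 ^ 53 + 2 ^ (S + 52) := by
  rw [roundMulPos_eq]
  set a := C * n with ha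
  set k := pvBits 100 a - 53 with hk
  clear_value a k
  have halt : a < 2 ^ 84 := by rw [ha]; nlinarith
  have hksmall : k ≤ 31 := by
    have := pvBits_le 100 a 84 halt
    omega
  have hhalf : 2 ^ 53 * 2 ^ (k - 1) ≤ a + 2 ^ 53 := by
    rcases Nat.eq_zero_or_pos k with h0 | h0
    · simp [h0]
    · have hbits : 54 ≤ pvBits 100 a := by omega
      have hane : a ≠ 0 := by
        intro hz
        rw [hz] at hbits
        simp [pvBits] at hbits
      have hpow := le_pvBits 100 a hane
      have eS0 : 53 + (k - 1) = pvBits 100 a - 1 := by omega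
      have he : 2 ^ 53 * 2 ^ (k - 1) = 2 ^ (pvBits 100 a - 1) := by
        rw [← pow_add, eS0]
      omega
  have h1 : 2 ^ k * pyRNE a k ≤ a + 2 ^ (k - 1) := pyRNE_le a k
  have h2 : 2 ^ (S - k) * pyRNE (pyRNE a k) (S - k) ≤ pyRNE a k + 2 ^ (S - k - 1) := pyRNE_le _ _
  have h3 : 2 ^ S * pyRNE (pyRNE a k) (S - k) ≤ 2 ^ k * pyRNE a k + 2 ^ (S - 1) := by
    have hmul := Nat.mul_le_mul_left (2 ^ k) h2
    have eS1 : k + (S - k) = S := by omega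
    have e1 : 2 ^ k * (2 ^ (S - k) * pyRNE (pyRNE a k) (S - k)) = 2 ^ S * pyRNE (pyRNE a k) (S - k) := by
      rw [← mul_assoc, ← pow_add, eS1]
    have eS2 : k + (S - k - 1) = S - 1 := by omega
    have e2 : 2 ^ k * (pyRNE a k + 2 ^ (S - k - 1)) = 2 ^ k * pyRNE a k + 2 ^ (S - 1) := by
      rw [Nat.mul_add, ← pow_add, eS2]
    omega
  have h4 : 2 ^ S * pyRNE (pyRNE a k) (S - k) ≤ a + 2 ^ (k - 1) + 2 ^ (S - 1) := by omega
  have h5 := Nat.mul_le_mul_left (2 ^ 53) h4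
  have e3 : 2 ^ 53 * (2 ^ S * pyRNE (pyRNE a k) (S - k)) = 2 ^ (53 + S) * pyRNE (pyRNE a k) (S - k) := by
    rw [← mul_assoc, ← pow_add]
  have eS3 : 53 + (S - 1) = S + 52 := by omega
  have e4 : 2 ^ 53 * (a + 2 ^ (k - 1) + 2 ^ (S - 1)) = 2 ^ 53 * a + 2 ^ (53 + (k - 1)) + 2 ^ (S + 52) := by
    rw [Nat.mul_add, Nat.mul_add, ← pow_add, ← pow_add, eS3]
  rw [e3, e4] at h5
  have hhalf' : 2 ^ (53 + (k - 1)) ≤ a + 2 ^ 53 := by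
    rw [pow_add]
    exact hhalf
  linarith

theorem heavy_sum_le (n : Nat) (hn : n ≤ 2 ^ 31) :
    roundMulPos 6305039478318694 53 n + roundMulPos 7205759403792794 55 n ≤ n := by
  rcases Nat.lt_or_ge n 11 with h | h
  · interval_cases n <;> decide
  · have h7 := roundMulPos_le 6305039478318694 53 n (by norm_num) hn (by norm_num) (by norm_num)
    have h2 := roundMulPos_le 7205759403792794 55 n (by norm_num) hn (by norm_num) (by norm_num)
    norm_num at h7 h2
    omega

theorem mixed_sum_le (n : Nat) (hn : n ≤ 2 ^ 31) :
    roundMulPos 5404319552844595 53 n + roundMulPos 4503599627370496 54 n ≤ n := by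
  rcases Nat.lt_or_ge n 11 with h | h
  · interval_cases n <;> decide
  · have h6 := roundMulPos_le 5404319552844595 53 n (by norm_num) hn (by norm_num) (by norm_num)
    have h25 := roundMulPos_le 4503599627370496 54 n (by norm_num) hn (by norm_num) (by norm_num)
    norm_num at h6 h25
    omega

theorem roundMul_nonneg (C S : Nat) (n : Int) (hn : 0 ≤ n) : 0 ≤ roundMul C S n := by
  unfold roundMul
  rw [if_neg (by omega)]
  positivity

theorem roundMul_nonpos (C S : Nat) (n : Int) (hn : n ≤ 0) : roundMul C S n ≤ 0 := by
  unfold roundMul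
  split_ifs with h
  · omega
  · have h0 : n = 0 := by omega
    simp [h0, roundMulPos_zero]

-- no-op loop
theorem foldl_fix {α β : Type} (l : List β) (f : α → β → α) (d : α)
    (h : ∀ x ∈ l, f d x = d) : l.foldl f d = d := by
  induction l with
  | nil => rfl
  | cons x t ih =>
    rw [List.foldl_cons, h x (by simp)]
    exact ih (fun y hy => h y (by simp [hy]))

theorem enum_replicate (m : Nat) (v : String) : ∀ s : Int,
    PySem.List.enumerate (List.replicate m v) s
      = (PySem.List.pyRange s (s + m) 1).map (fun i => (i, v)) := by
  induction m with
  | zero =>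
    intro s
    rw [List.replicate_zero, PySem.List.enumerate_nil,
      PySem.List.pyRange_one_eq_nil (by simp)]
    simp
  | succ m ih =>
    intro s
    rw [List.replicate_succ, PySem.List.enumerate_cons, ih (s + 1)]
    have he : s + 1 + (m : Int) = s + ((m + 1 : Nat) : Int) := by push_cast; ring
    rw [he, PySem.List.pyRange_one_cons
      (show s < s + ((m + 1 : Nat) : Int) by push_cast; omega), List.map_cons]

-- items of a fresh ascending insert segment
theorem seg_items (d : PySem.Dict Int String) (lo hi : Int) (v : String)
    (hfresh : ∀ i, lo ≤ i → i < hi → d.contains i = false) :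
    ((PySem.List.pyRange lo hi 1).foldl (fun d i => d.insert i v) d).items
      = d.items ++ (PySem.List.pyRange lo hi 1).map (fun i => (i, v)) := by
  have h := PySem.Dict.items_foldl_insert_fresh (l := PySem.List.pyRange lo hi 1)
    (k := fun i => i) (v := fun _ => v) (d := d)
    (by
      intro a ha
      rw [PySem.List.mem_pyRange_one] at ha
      exact hfresh a ha.1 ha.2)
    (by simpa using PySem.List.nodup_pyRange_one lo hi)
  simpa using h

theorem keys_seg (d : PySem.Dict Int String) (lo hi : Int) (v : String) (i : Int) :
    i ∈ ((PySem.List.pyRange lo hi 1).foldl (fun d i => d.insert i v) d).keys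
      ↔ i ∈ d.keys ∨ (lo ≤ i ∧ i < hi) := by
  rw [show (fun (d : PySem.Dict Int String) (i : Int) => d.insert i v)
      = (fun d i => d.insert i ((fun (_ : PySem.Dict Int String) (_ : Int) => v) d i)) from rfl,
    PySem.Dict.keys_foldl_insert]
  rw [show PySem.Set.update d.keys (PySem.List.pyRange lo hi 1)
      = (PySem.List.pyRange lo hi 1).foldl PySem.Set.add d.keys from rfl]
  rw [show (PySem.List.pyRange lo hi 1).foldl PySem.Set.add d.keys
      = (PySem.List.pyRange lo hi 1).foldl (fun s b => PySem.Set.add s ((fun x => x) b)) d.keys from rfl,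
    PySem.Set.mem_foldl_add]
  simp [PySem.List.mem_pyRange_one]

-- the common shape of A's two three-block branches vs B's flat-list build
theorem seg3_eq (n a b : Int) (v1 v2 v3 vd : String) (ha : 0 ≤ a) (hb : 0 ≤ b) :
    ((PySem.List.pyRange 0 n 1).foldl (fun d i => d.setdefault i vd) ((PySem.List.pyRange (a + b) (a + b + max 0 (n - a - b)) 1).foldl (fun d i => d.insert i v3) ((PySem.List.pyRange a (a + b) 1).foldl (fun d i => d.insert i v2) ((PySem.List.pyRange 0 a 1).foldl (fun d i => d.insert i v1) (PySem.Dict.empty : PySem.Dict Int String))))).items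
    = PySem.List.enumerate
        (List.replicate a.toNat v1 ++ List.replicate b.toNat v2
          ++ List.replicate (max 0 (n - a - b)).toNat v3) 0 := by
  set c := max 0 (n - a - b) with hcdef
  have hc : 0 ≤ c := le_max_left _ _
  have hnc : n ≤ a + b + c := by
    have := le_max_right 0 (n - a - b)
    omega
  set t1 := (PySem.List.pyRange 0 a 1).foldl (fun d i => d.insert i v1)
    (PySem.Dict.empty : PySem.Dict Int String) with ht1
  set t2 := (PySem.List.pyRange a (a + b) 1).foldl (fun d i => d.insert i v2) t1 with ht2
  set t3 := (PySem.List.pyRange (a + b) (a + b + c) 1).foldl (fun d i => d.insert i v3) t2 with ht3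
  -- key membership after each segment
  have hk1 : ∀ i : Int, i ∈ t1.keys ↔ (0 ≤ i ∧ i < a) := by
    intro i
    rw [ht1, keys_seg]
    simp [PySem.Dict.keys_empty]
  have hk2 : ∀ i : Int, i ∈ t2.keys ↔ (0 ≤ i ∧ i < a) ∨ (a ≤ i ∧ i < a + b) := by
    intro i
    rw [ht2, keys_seg, hk1]
  have hk3 : ∀ i : Int, i ∈ t3.keys ↔ (0 ≤ i ∧ i < a) ∨ (a ≤ i ∧ i < a + b) ∨ (a + b ≤ i ∧ i < a + b + c) := by
    intro i
    rw [ht3, keys_seg, hk2]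
    tauto
  -- the setdefault pass is a no-op
  have hset : (PySem.List.pyRange 0 n 1).foldl (fun d i => d.setdefault i vd) t3 = t3 := by
    apply foldl_fix
    intro i hi
    rw [PySem.List.mem_pyRange_one] at hi
    apply PySem.Dict.setdefault_of_contains
    rw [PySem.Dict.contains_iff_mem_keys, hk3 i]
    omega
  rw [hset]
  -- items of the three segments
  have hi1 : t1.items = (PySem.List.pyRange 0 a 1).map (fun i => (i, v1)) := by
    rw [ht1, seg_items _ _ _ _ (by intro i _ _; exact PySem.Dict.contains_empty i)]
    rfl
  have hcontains : ∀ (d : PySem.Dict Int String) (i : Int), (i ∈ d.keys ↔ False) → d.contains i = false := by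
    intro d i h
    rw [← Bool.not_eq_true, PySem.Dict.contains_iff_mem_keys]
    simp [h]
  have hi2 : t2.items = t1.items ++ (PySem.List.pyRange a (a + b) 1).map (fun i => (i, v2)) := by
    rw [ht2]
    apply seg_items
    intro i h1 h2
    apply hcontains
    rw [hk1 i]
    constructor
    · omega
    · intro h
      exact h.elim
  have hi3 : t3.items = t2.items ++ (PySem.List.pyRange (a + b) (a + b + c) 1).map (fun i => (i, v3)) := by
    rw [ht3]
    apply seg_items
    intro i h1 h2
    apply hcontains
    rw [hk2 i]
    constructor
    · omega
    · intro h
      exact h.elim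
  rw [hi3, hi2, hi1]
  -- B's side: enumerate of the concatenated replicate blocks
  rw [PySem.List.enumerate_append, PySem.List.enumerate_append,
    enum_replicate, enum_replicate, enum_replicate]
  simp only [List.length_replicate, List.length_append]
  have g1 : (0 : Int) + (a.toNat : Int) = a := by omega
  rw [g1]
  have g2 : a + (b.toNat : Int) = a + b := by omega
  rw [g2]
  have g4 : (0 : Int) + ((a.toNat + b.toNat : Nat) : Int) = a + b := by push_cast; omega
  rw [g4]
  have g3 : a + b + (c.toNat : Int) = a + b + c := by omega
  rw [g3, List.append_assoc]



def altStep (n : Int) : List String → (String × Option (Nat × Nat)) → List String :=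
  fun flat lf =>
    let count : Int :=
      match lf.2 with
      | none => max 0 (n - (flat.length : Int))
      | some cs => roundMul cs.1 cs.2 n
    flat ++ List.replicate count.toNat lf.1

theorem alt_eq (n : Int) (mode : String) :
    build_bot_types_alt n mode = PySem.List.enumerate
      ((((PySem.Dict.ofList
        [("all_mimic", [("mimic", none)]),
         ("all_slowburn", [("slowburn", none)]),
         ("all_burst", [("burst", none)]),
         ("mimic_heavy", [("mimic", some (6305039478318694, 53)),
                          ("slowburn", some (7205759403792794, 55)), ("burst", none)])]
        : PySem.Dict String (List (String × Option (Nat × Nat)))).get? mode).getD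
        [("slowburn", some (5404319552844595, 53)), ("burst", some (4503599627370496, 54)),
         ("mimic", none)]).foldl (altStep n) []) 0 := rfl


theorem alt_heavy (n : Int) :
    build_bot_types_alt n "mimic_heavy" = PySem.List.enumerate
      (List.replicate (roundMul 6305039478318694 53 n).toNat "mimic"
        ++ (List.replicate (roundMul 7205759403792794 55 n).toNat "slowburn"
        ++ List.replicate (max 0 (n -
             (((roundMul 6305039478318694 53 n).toNat
               + (roundMul 7205759403792794 55 n).toNat : Nat) : Int))).toNat "burst")) 0 := by
  rw [alt_eq]
  have hsp : ((PySem.Dict.ofList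
        [("all_mimic", [("mimic", none)]),
         ("all_slowburn", [("slowburn", none)]),
         ("all_burst", [("burst", none)]),
         ("mimic_heavy", [("mimic", some (6305039478318694, 53)),
                          ("slowburn", some (7205759403792794, 55)), ("burst", none)])]
        : PySem.Dict String (List (String × Option (Nat × Nat)))).get? "mimic_heavy").getD
        [("slowburn", some (5404319552844595, 53)), ("burst", some (4503599627370496, 54)),
         ("mimic", none)]
      = [("mimic", some ((6305039478318694 : Nat), (53 : Nat))),
         ("slowburn", some (7205759403792794, 55)), ("burst", none)] := by decide
  rw [hsp]
  simp only [List.foldl, altStep, List.nil_append, List.length_append, List.length_replicate]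
  rw [List.append_assoc]

theorem alt_default (n : Int) (mode : String)
    (h1 : (mode == "all_mimic") = false) (h2 : (mode == "all_slowburn") = false)
    (h3 : (mode == "all_burst") = false) (h4 : (mode == "mimic_heavy") = false) :
    build_bot_types_alt n mode = PySem.List.enumerate
      (List.replicate (roundMul 5404319552844595 53 n).toNat "slowburn"
        ++ (List.replicate (roundMul 4503599627370496 54 n).toNat "burst"
        ++ List.replicate (max 0 (n -
             (((roundMul 5404319552844595 53 n).toNat
               + (roundMul 4503599627370496 54 n).toNat : Nat) : Int))).toNat "mimic")) 0 := by
  rw [alt_eq]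
  have hmk : (PySem.Dict.ofList
        [("all_mimic", [("mimic", none)]),
         ("all_slowburn", [("slowburn", none)]),
         ("all_burst", [("burst", none)]),
         ("mimic_heavy", [("mimic", some (6305039478318694, 53)),
                          ("slowburn", some (7205759403792794, 55)), ("burst", none)])]
        : PySem.Dict String (List (String × Option (Nat × Nat))))
      = PySem.Dict.mk
        [("all_mimic", [("mimic", none)]),
         ("all_slowburn", [("slowburn", none)]),
         ("all_burst", [("burst", none)]),
         ("mimic_heavy", [("mimic", some (6305039478318694, 53)),
                          ("slowburn", some (7205759403792794, 55)), ("burst", none)])] := by decide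
  have e1 : ("all_mimic" == mode) = false := by
    rw [beq_eq_false_iff_ne] at h1 ⊢
    exact fun e => h1 e.symm
  have e2 : ("all_slowburn" == mode) = false := by
    rw [beq_eq_false_iff_ne] at h2 ⊢
    exact fun e => h2 e.symm
  have e3 : ("all_burst" == mode) = false := by
    rw [beq_eq_false_iff_ne] at h3 ⊢
    exact fun e => h3 e.symm
  have e4 : ("mimic_heavy" == mode) = false := by
    rw [beq_eq_false_iff_ne] at h4 ⊢
    exact fun e => h4 e.symm
  rw [hmk]
  rw [PySem.Dict.get?_mk_cons, if_neg (by simp [e1]), PySem.Dict.get?_mk_cons, if_neg (by simp [e2]),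
    PySem.Dict.get?_mk_cons, if_neg (by simp [e3]), PySem.Dict.get?_mk_cons, if_neg (by simp [e4])]
  have hnil : (PySem.Dict.mk ([] : List (String × List (String × Option (Nat × Nat))))).get? mode
      = none := rfl
  rw [hnil]
  simp only [List.foldl, altStep, List.nil_append, List.length_append, List.length_replicate,
    Option.getD]
  rw [List.append_assoc]

theorem alt_all_mode (n : Int) (v : String) (mode : String)
    (hv : (((PySem.Dict.ofList
        [("all_mimic", [("mimic", none)]),
         ("all_slowburn", [("slowburn", none)]),
         ("all_burst", [("burst", none)]),
         ("mimic_heavy", [("mimic", some (6305039478318694, 53)),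
                          ("slowburn", some (7205759403792794, 55)), ("burst", none)])]
        : PySem.Dict String (List (String × Option (Nat × Nat)))).get? mode).getD
        [("slowburn", some (5404319552844595, 53)), ("burst", some (4503599627370496, 54)),
         ("mimic", none)]) = [(v, none)]) :
    build_bot_types_alt n mode
      = PySem.List.enumerate (List.replicate (max 0 (n - 0)).toNat v) 0 := by
  rw [alt_eq, hv]
  simp only [List.foldl, altStep, List.nil_append, List.length_nil]
  norm_num

theorem seg1_eq (n : Int) (v : String) :
    ((PySem.List.pyRange 0 n 1).foldl (fun d i => d.insert i v)
        (PySem.Dict.empty : PySem.Dict Int String)).items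
      = PySem.List.enumerate (List.replicate (max 0 (n - 0)).toNat v) 0 := by
  rw [seg_items _ _ _ _ (fun i _ _ => PySem.Dict.contains_empty i), enum_replicate]
  have h0 : (0 : Int) + ((max 0 (n - 0)).toNat : Int) = max 0 n := by omega
  rw [h0]
  have hitems : (PySem.Dict.empty : PySem.Dict Int String).items = [] := rfl
  rw [hitems, List.nil_append, PySem.List.pyRange_one, PySem.List.pyRange_one]
  have : (n - 0).toNat = (max 0 n - 0).toNat := by omega
  rw [this]

theorem seg3_nil (n a b : Int) (v1 v2 v3 vd : String)
    (hn : n ≤ 0) (ha : a ≤ 0) (hb : b ≤ 0) (hab : n - a - b ≤ 0) :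
    ((PySem.List.pyRange 0 n 1).foldl (fun d i => d.setdefault i vd) ((PySem.List.pyRange (a + b) (a + b + max 0 (n - a - b)) 1).foldl (fun d i => d.insert i v3) ((PySem.List.pyRange a (a + b) 1).foldl (fun d i => d.insert i v2) ((PySem.List.pyRange 0 a 1).foldl (fun d i => d.insert i v1) (PySem.Dict.empty : PySem.Dict Int String))))).items = [] := by
  rw [PySem.List.pyRange_one_eq_nil (by omega : a ≤ 0),
    PySem.List.pyRange_one_eq_nil (by omega : a + b ≤ a),
    PySem.List.pyRange_one_eq_nil (by omega : a + b + max 0 (n - a - b) ≤ a + b),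
    PySem.List.pyRange_one_eq_nil (by omega : n ≤ 0)]
  rfl

theorem equiv_main : ∀ (num_bots : Int) (mode : String),
    (-2147483648 ≤ num_bots ∧ num_bots ≤ 2147483648) →
    build_bot_types num_bots mode = build_bot_types_alt num_bots mode := by
  intro n mode hdom
  unfold build_bot_types
  by_cases h1 : (mode == "all_mimic") = true
  · rw [if_pos h1]
    have hm : mode = "all_mimic" := beq_iff_eq.mp h1
    subst hm
    rw [alt_all_mode n "mimic" _ (by decide), seg1_eq]
  rw [if_neg h1]
  by_cases h2 : (mode == "all_slowburn") = true
  · rw [if_pos h2]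
    have hm : mode = "all_slowburn" := beq_iff_eq.mp h2
    subst hm
    rw [alt_all_mode n "slowburn" _ (by decide), seg1_eq]
  rw [if_neg h2]
  by_cases h3 : (mode == "all_burst") = true
  · rw [if_pos h3]
    have hm : mode = "all_burst" := beq_iff_eq.mp h3
    subst hm
    rw [alt_all_mode n "burst" _ (by decide), seg1_eq]
  rw [if_neg h3]
  by_cases h4 : (mode == "mimic_heavy") = true
  · rw [if_pos h4]
    have hm : mode = "mimic_heavy" := beq_iff_eq.mp h4
    subst hm
    rw [alt_heavy]
    dsimp only
    by_cases hn : 0 ≤ n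
    · have ha : 0 ≤ roundMul 6305039478318694 53 n := roundMul_nonneg _ _ _ hn
      have hb : 0 ≤ roundMul 7205759403792794 55 n := roundMul_nonneg _ _ _ hn
      rw [seg3_eq n (roundMul 6305039478318694 53 n) (roundMul 7205759403792794 55 n) "mimic" "slowburn" "burst" "mimic" ha hb]
      have hmx : max 0 (n - (((roundMul 6305039478318694 53 n).toNat + (roundMul 7205759403792794 55 n).toNat : Nat) : Int)) = max 0 (n - (roundMul 6305039478318694 53 n) - (roundMul 7205759403792794 55 n)) := by
        push_cast
        omega
      rw [hmx, List.append_assoc]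
    · have hnn : n ≤ 0 := by omega
      have ha : roundMul 6305039478318694 53 n ≤ 0 := roundMul_nonpos _ _ _ hnn
      have hb : roundMul 7205759403792794 55 n ≤ 0 := roundMul_nonpos _ _ _ hnn
      have hA : roundMul 6305039478318694 53 n = -(roundMulPos 6305039478318694 53 (-n).toNat : Int) := by
        unfold roundMul
        rw [if_pos (by omega)]
      have hB : roundMul 7205759403792794 55 n = -(roundMulPos 7205759403792794 55 (-n).toNat : Int) := by
        unfold roundMul
        rw [if_pos (by omega)]
      have hsum := heavy_sum_le (-n).toNat (by omega)
      have hab : n - roundMul 6305039478318694 53 n - roundMul 7205759403792794 55 n ≤ 0 := by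
        rw [hA, hB]
        omega
      rw [seg3_nil n (roundMul 6305039478318694 53 n) (roundMul 7205759403792794 55 n) "mimic" "slowburn" "burst" "mimic" hnn ha hb hab]
      have za : (roundMul 6305039478318694 53 n).toNat = 0 := by omega
      have zb : (roundMul 7205759403792794 55 n).toNat = 0 := by omega
      rw [za, zb]
      have zc : (max 0 (n - (((0 + 0 : Nat)) : Int))).toNat = 0 := by omega
      rw [zc]
      rfl
  rw [if_neg h4]
  rw [alt_default n mode (by simpa using h1) (by simpa using h2) (by simpa using h3) (by simpa using h4)]
  dsimp only
  by_cases hn : 0 ≤ n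
  · have ha : 0 ≤ roundMul 5404319552844595 53 n := roundMul_nonneg _ _ _ hn
    have hb : 0 ≤ roundMul 4503599627370496 54 n := roundMul_nonneg _ _ _ hn
    rw [seg3_eq n (roundMul 5404319552844595 53 n) (roundMul 4503599627370496 54 n) "slowburn" "burst" "mimic" "slowburn" ha hb]
    have hmx : max 0 (n - (((roundMul 5404319552844595 53 n).toNat + (roundMul 4503599627370496 54 n).toNat : Nat) : Int)) = max 0 (n - (roundMul 5404319552844595 53 n) - (roundMul 4503599627370496 54 n)) := by
      push_cast
      omega
    rw [hmx, List.append_assoc]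
  · have hnn : n ≤ 0 := by omega
    have ha : roundMul 5404319552844595 53 n ≤ 0 := roundMul_nonpos _ _ _ hnn
    have hb : roundMul 4503599627370496 54 n ≤ 0 := roundMul_nonpos _ _ _ hnn
    have hA : roundMul 5404319552844595 53 n = -(roundMulPos 5404319552844595 53 (-n).toNat : Int) := by
      unfold roundMul
      rw [if_pos (by omega)]
    have hB : roundMul 4503599627370496 54 n = -(roundMulPos 4503599627370496 54 (-n).toNat : Int) := by
      unfold roundMul
      rw [if_pos (by omega)]
    have hsum := mixed_sum_le (-n).toNat (by omega)
    have hab : n - roundMul 5404319552844595 53 n - roundMul 4503599627370496 54 n ≤ 0 := by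
      rw [hA, hB]
      omega
    rw [seg3_nil n (roundMul 5404319552844595 53 n) (roundMul 4503599627370496 54 n) "slowburn" "burst" "mimic" "slowburn" hnn ha hb hab]
    have za : (roundMul 5404319552844595 53 n).toNat = 0 := by omega
    have zb : (roundMul 4503599627370496 54 n).toNat = 0 := by omega
    rw [za, zb]
    have zc : (max 0 (n - (((0 + 0 : Nat)) : Int))).toNat = 0 := by omega
    rw [zc]
    rfl

-- ===== VERDICT (by name: the statement is the Claim_ definition above) =====
theorem build_bot_types_spec : Claim_equal_build_bot_types := by
  intro num_bots mode hdom
  have hb : -2147483648 ≤ num_bots ∧ num_bots ≤ 2147483648 := by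
    have h := ((Bool.and_eq_true _ _).mp hdom).1
    unfold pvDomInt at h
    exact of_decide_eq_true h
  unfold Spec_build_bot_types
  exact equiv_main num_bots mode hb
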